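-- pv_equiv track=rewrite | github.com/daniel-reich/ubiquitous-fiesta | tjMNAEgkNvM5eyEqJ_20.py | unique_abbrev
-- ===== SOURCE A (Python) =====
-- def unique_abbrev(abbs, words):
--   k = 0
--   while k < len(abbs):
--     i = 0
--     num = 0
--     while i < len(words):
--       if words[i].startswith(abbs[k]):
--         num = num + 1
--       if num > 1:
--         return False
--       i = i + 1
--     k = k + 1
--   return True
-- ===== SOURCE B (Python) =====
-- def unique_abbrev(abbs, words):
--     # Count every prefix of every word once, then each abbreviation is a
--     # single dictionary lookup instead of a scan over all words.
--     cnt = {}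
--     for w in words:
--         for i in range(len(w) + 1):
--             p = w[:i]
--             cnt[p] = cnt.get(p, 0) + 1
--     for a in abbs:
--         if cnt.get(a, 0) > 1:
--             return False
--     return True
-- ===== Notes on version B (the rewrite author's own statement) =====
-- stated objective: alternative
-- what changed: Replaces the per-abbreviation scan over all words by a prefix-count dictionary built once from all prefixes of the words, so each abbreviation becomes a single dictionary lookup; it trades A's early exit for precomputation.
import Mathlib
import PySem

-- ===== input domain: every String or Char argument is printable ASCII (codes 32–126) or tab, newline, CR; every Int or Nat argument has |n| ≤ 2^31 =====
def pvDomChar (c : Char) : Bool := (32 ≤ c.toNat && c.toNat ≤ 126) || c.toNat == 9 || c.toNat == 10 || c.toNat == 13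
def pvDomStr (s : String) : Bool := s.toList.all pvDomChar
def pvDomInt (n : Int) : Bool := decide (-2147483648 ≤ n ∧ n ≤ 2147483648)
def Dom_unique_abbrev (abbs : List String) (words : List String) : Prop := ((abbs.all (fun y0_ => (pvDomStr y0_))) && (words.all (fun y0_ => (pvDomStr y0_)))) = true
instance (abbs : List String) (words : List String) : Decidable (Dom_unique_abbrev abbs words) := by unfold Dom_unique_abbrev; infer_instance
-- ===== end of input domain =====

-- B replaces A's per-abbreviation scan over all words with a prefix-count
-- dictionary built once; each abbreviation is then one lookup (alternative
-- algorithm, same return value).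

-- ===== PORT A =====
-- A's inner while loop: count words starting with abbs[k], early return False when num > 1
def uaInner (a : String) : List String → Int → Bool
  | [], _ => true
  | w :: ws, num =>
    let num' := if PySem.Str.startswith w a then num + 1 else num
    if num' > 1 then false else uaInner a ws num'

-- A's outer while loop over abbs
def unique_abbrev (abbs : List String) (words : List String) : Bool :=
  match abbs with
  | [] => true
  | a :: rest => if uaInner a words 0 then unique_abbrev rest words else false

-- ===== PORT B =====
-- cnt[p] = cnt.get(p, 0) + 1 over every prefix w[:i], i in range(len(w)+1);
-- w[:i] with 0 ≤ i ≤ len(w) is exactly List.take i on the code points.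
def uaBuildCnt (words : List String) : PySem.Dict (List Char) Int :=
  words.foldl
    (fun d w =>
      (List.range (w.toList.length + 1)).foldl
        (fun d i =>
          let p := w.toList.take i
          d.insert p (d.getD p 0 + 1)) d)
    PySem.Dict.empty

-- B's final loop: early return False when cnt.get(a, 0) > 1
def uaCheck (cnt : PySem.Dict (List Char) Int) : List String → Bool
  | [] => true
  | a :: rest => if cnt.getD a.toList 0 > 1 then false else uaCheck cnt rest

def unique_abbrev_alt (abbs : List String) (words : List String) : Bool :=
  uaCheck (uaBuildCnt words) abbs

-- ===== PRECONDITION & SPEC =====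
def Spec_unique_abbrev (abbs : List String) (words : List String) (out : Bool) : Prop := out = unique_abbrev_alt abbs words
instance (abbs : List String) (words : List String) (out : Bool) : Decidable (Spec_unique_abbrev abbs words out) := by unfold Spec_unique_abbrev; infer_instance

-- ===== CLAIM (what is proved, stated in full; the proofs are below) =====
def Claim_equal_unique_abbrev : Prop := ∀ (abbs : List String) (words : List String), Dom_unique_abbrev abbs words → Spec_unique_abbrev abbs words (unique_abbrev abbs words)

-- ===== LEMMAS AND PROOFS =====

-- the list of prefixes of t has no duplicates and contains v iff v <+: t
lemma uaPrefList_count (t v : List Char) :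
    ((List.range (t.length + 1)).map (fun i => t.take i)).count v
      = if v <+: t then 1 else 0 := by
  have hnd : ((List.range (t.length + 1)).map (fun i => t.take i)).Nodup := by
    refine (List.nodup_range).map_on ?_
    intro i hi j hj hij
    have hi' : i ≤ t.length := by simpa using Nat.lt_succ_iff.mp (List.mem_range.mp hi)
    have hj' : j ≤ t.length := by simpa using Nat.lt_succ_iff.mp (List.mem_range.mp hj)
    have := congrArg List.length hij
    simpa [Nat.min_eq_left hi', Nat.min_eq_left hj'] using this
  have hmem : v ∈ (List.range (t.length + 1)).map (fun i => t.take i) ↔ v <+: t := by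
    simp only [List.mem_map, List.mem_range, Nat.lt_succ_iff]
    constructor
    · rintro ⟨i, hi, rfl⟩; exact List.take_prefix i t
    · intro h
      exact ⟨v.length, h.length_le, (List.prefix_iff_eq_take.mp h).symm⟩
  by_cases h : v <+: t
  · simp [h, List.count_eq_one_of_mem hnd (hmem.mpr h)]
  · simp [h, List.count_eq_zero_of_not_mem (fun hm => h (hmem.mp hm))]

-- one word's inner loop adds 1 at key v exactly when v is a prefix of the word
lemma uaInnerFold (d : PySem.Dict (List Char) Int) (t v : List Char) :
    ((List.range (t.length + 1)).foldl
        (fun d i => let p := t.take i; d.insert p (d.getD p 0 + 1)) d).getD v 0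
      = d.getD v 0 + (if v <+: t then 1 else 0) := by
  have h := List.foldl_map (f := fun i => t.take i)
      (g := fun (d : PySem.Dict (List Char) Int) p => d.insert p (d.getD p 0 + 1))
      (l := List.range (t.length + 1)) (init := d)
  rw [← h, PySem.Dict.getD_foldl_insert_add_one, uaPrefList_count]
  split <;> simp

-- B's counter stores, at key v, the number of words with prefix v
lemma uaBuildCnt_getD (words : List String) (v : List Char) :
    (uaBuildCnt words).getD v 0
      = (words.countP (fun w => decide (v <+: w.toList)) : Int) := by
  suffices h : ∀ (d : PySem.Dict (List Char) Int),
      (words.foldl (fun d w =>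
        (List.range (w.toList.length + 1)).foldl
          (fun d i => let p := w.toList.take i; d.insert p (d.getD p 0 + 1)) d) d).getD v 0
      = d.getD v 0 + (words.countP (fun w => decide (v <+: w.toList)) : Int) by
    simpa [uaBuildCnt] using h PySem.Dict.empty
  induction words with
  | nil => simp
  | cons w ws ih =>
    intro d
    simp only [List.foldl_cons, ih, uaInnerFold, List.countP_cons]
    by_cases hp : v <+: w.toList
    · simp only [hp, decide_true, if_pos]
      push_cast
      ring
    · simp [hp]

-- w.startswith(a) tests the prefix relation on code points
lemma uaStartswith (w a : String) :
    PySem.Str.startswith w a = decide (a.toList <+: w.toList) := by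
  rw [PySem.Str.startswith_eq]
  by_cases hp : a.toList <+: w.toList
  · simp [hp, (PySem.Chars.startswith_iff _ _).mpr hp]
  · simp only [hp, decide_false]
    exact Bool.eq_false_iff.mpr (fun hb => hp ((PySem.Chars.startswith_iff _ _).mp hb))

-- A's inner loop decides "num + matches ≤ 1"
lemma uaInner_eq (a : String) (words : List String) (num : Int) (h : num ≤ 1) :
    uaInner a words num
      = decide (num + (words.countP (fun w => decide (a.toList <+: w.toList)) : Int) ≤ 1) := by
  induction words generalizing num with
  | nil => simp [uaInner, h]
  | cons w ws ih =>
    simp only [uaInner, uaStartswith, List.countP_cons]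
    by_cases hp : a.toList <+: w.toList
    · simp only [hp, decide_true, if_true]
      by_cases h2 : num + 1 > 1
      · rw [if_pos h2]
        symm
        rw [decide_eq_false_iff_not]
        push_cast
        omega
      · rw [if_neg h2, ih _ (by omega), decide_eq_decide]
        push_cast
        omega
    · simp only [hp, decide_false, Bool.false_eq_true, if_false]
      rw [if_neg (by omega : ¬ num > 1), ih _ h, decide_eq_decide]
      push_cast
      omega

-- ===== VERDICT (by name: the statement is the Claim_ definition above) =====
theorem unique_abbrev_spec : Claim_equal_unique_abbrev := by
  intro abbs words hd
  clear hd
  unfold Spec_unique_abbrev unique_abbrev_alt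
  induction abbs with
  | nil => simp [unique_abbrev, uaCheck]
  | cons a rest ih =>
    simp only [unique_abbrev, uaCheck, uaBuildCnt_getD, uaInner_eq a words 0 (by omega)]
    by_cases hc : ((words.countP (fun w => decide (a.toList <+: w.toList)) : Int) ≤ 1)
    · rw [if_pos (by simpa using hc), if_neg (by omega), ih]
    · rw [if_neg (by simpa using hc), if_pos (by omega)]
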